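-- pv_equiv track=rewrite | github.com/stylerm/UE5-Shader-Reference | build.py | _hl_tokens
-- ===== SOURCE A (Python) =====
-- _TYPES = frozenset({
--     "float", "float2", "float3", "float4",
--     "half",  "half2",  "half3",  "half4",
--     "int",   "int2",   "int3",   "int4",
--     "uint",  "uint2",  "uint3",  "uint4",
--     "bool",  "bool2",  "bool3",  "bool4",
--     "void",  "double", "min16float", "min16float3", "min16float4",
--     "int3",  "uint3",  "int32",
--     # GLSL types (used in cross-language examples)
--     "vec2",  "vec3",   "vec4",
-- })
--
-- _KEYWORDS = frozenset({
--     "struct", "return", "inout", "in", "out", "static", "const",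
--     "if", "else", "for", "while", "break", "continue", "do", "switch", "case",
--     "groupshared", "cbuffer",
--     "Buffer", "RWBuffer", "Texture2D", "RWTexture2D", "Texture2DArray",
--     "SamplerState", "StructuredBuffer", "RWStructuredBuffer", "ByteAddressBuffer",
--     "SV_DispatchThreadID", "SV_GroupThreadID", "SV_GroupID",
--     "FStatelessParticle", "FStatelessParticleContext",
-- })
--
-- _BUILTINS = frozenset({
--     "lerp", "saturate", "normalize", "dot", "cross", "length", "distance",
--     "reflect", "refract", "pow", "abs", "sign", "sqrt", "rsqrt",
--     "frac", "floor", "ceil", "round", "clamp", "min", "max",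
--     "sin", "cos", "tan", "asin", "acos", "atan2", "atan",
--     "exp", "log", "log2", "exp2", "fmod",
--     "smoothstep", "step", "ddx", "ddy", "mul", "transpose", "determinant",
--     "Texture2DSample", "Texture2DSampleLevel", "Load", "SampleLevel",
--     "GroupMemoryBarrierWithGroupSync", "AllMemoryBarrierWithGroupSync",
--     "InterlockedAdd", "InterlockedMin", "InterlockedMax",
--     "ExternalTexture", "TextureSample",
--     # User-defined helpers shown in examples
--     "QuatMultiply", "ReadFloat3FromBuffer", "ReadFloat4FromBuffer",
--     "hash21", "glsl_mod", "SmoothMin", "PointDist", "SegmentDist",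
--     "MainCS", "MyModule_Initialize",
--     "DECLARE_TILE_CACHE_FLOAT", "LOAD_TILE_SCROLLED",
-- })
--
-- def _hl_tokens(s: str) -> str:
--     """Tokenise one line and emit syntax-highlighted HTML."""
--     out = []
--     i = 0
--     while i < len(s):
--         # Inline comment — rest of line
--         if s[i:i+2] == "//":
--             out.append(f'<span class="c">{s[i:]}</span>')
--             break
--
--         # Word / identifier
--         if s[i].isalpha() or s[i] == "_":
--             j = i
--             while j < len(s) and (s[j].isalnum() or s[j] == "_"):
--                 j += 1
--             word = s[i:j]
--             # Look-ahead for '(' to detect any function call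
--             k = j
--             while k < len(s) and s[k] == " ":
--                 k += 1
--             is_call = k < len(s) and s[k] == "("
--
--             if word in _TYPES or word in _KEYWORDS:
--                 out.append(f'<span class="kw">{word}</span>')
--             elif word in _BUILTINS or is_call:
--                 out.append(f'<span class="fn">{word}</span>')
--             else:
--                 out.append(word)
--             i = j
--
--         else:
--             out.append(s[i])
--             i += 1
--     return "".join(out)
-- ===== SOURCE B (Python) =====
-- _TYPES = frozenset({
--     "float", "float2", "float3", "float4",
--     "half",  "half2",  "half3",  "half4",
--     "int",   "int2",   "int3",   "int4",
--     "uint",  "uint2",  "uint3",  "uint4",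
--     "bool",  "bool2",  "bool3",  "bool4",
--     "void",  "double", "min16float", "min16float3", "min16float4",
--     "int3",  "uint3",  "int32",
--     "vec2",  "vec3",   "vec4",
-- })
--
-- _KEYWORDS = frozenset({
--     "struct", "return", "inout", "in", "out", "static", "const",
--     "if", "else", "for", "while", "break", "continue", "do", "switch", "case",
--     "groupshared", "cbuffer",
--     "Buffer", "RWBuffer", "Texture2D", "RWTexture2D", "Texture2DArray",
--     "SamplerState", "StructuredBuffer", "RWStructuredBuffer", "ByteAddressBuffer",
--     "SV_DispatchThreadID", "SV_GroupThreadID", "SV_GroupID",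
--     "FStatelessParticle", "FStatelessParticleContext",
-- })
--
-- _BUILTINS = frozenset({
--     "lerp", "saturate", "normalize", "dot", "cross", "length", "distance",
--     "reflect", "refract", "pow", "abs", "sign", "sqrt", "rsqrt",
--     "frac", "floor", "ceil", "round", "clamp", "min", "max",
--     "sin", "cos", "tan", "asin", "acos", "atan2", "atan",
--     "exp", "log", "log2", "exp2", "fmod",
--     "smoothstep", "step", "ddx", "ddy", "mul", "transpose", "determinant",
--     "Texture2DSample", "Texture2DSampleLevel", "Load", "SampleLevel",
--     "GroupMemoryBarrierWithGroupSync", "AllMemoryBarrierWithGroupSync",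
--     "InterlockedAdd", "InterlockedMin", "InterlockedMax",
--     "ExternalTexture", "TextureSample",
--     "QuatMultiply", "ReadFloat3FromBuffer", "ReadFloat4FromBuffer",
--     "hash21", "glsl_mod", "SmoothMin", "PointDist", "SegmentDist",
--     "MainCS", "MyModule_Initialize",
--     "DECLARE_TILE_CACHE_FLOAT", "LOAD_TILE_SCROLLED",
-- })
--
--
-- def _hl_tokens(s: str) -> str:
--     """Tokenise one line and emit syntax-highlighted HTML.
--
--     Single left-to-right state machine over the characters: the comment tail is
--     split off up front with str.partition, and identifiers are accumulated in a
--     pending-word/pending-spaces state instead of index-based inner scans.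
--     """
--     code, sep, comment = s.partition("//")
--     out = []
--     word = None     # chars of the identifier being accumulated, or None
--     spaces = 0      # spaces seen since the pending word ended
--
--     def flush(next_is_paren):
--         nonlocal word, spaces
--         if word is not None:
--             w = "".join(word)
--             if w in _TYPES or w in _KEYWORDS:
--                 out.append(f'<span class="kw">{w}</span>')
--             elif w in _BUILTINS or next_is_paren:
--                 out.append(f'<span class="fn">{w}</span>')
--             else:
--                 out.append(w)
--             word = None
--         out.append(" " * spaces)
--         spaces = 0
--
--     for ch in code:
--         if word is not None and (ch.isalnum() or ch == "_"):
--             if spaces == 0: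
--                 word.append(ch)
--                 continue
--             flush(False)
--         if ch == " ":
--             if word is not None:
--                 spaces += 1
--                 continue
--             out.append(ch)
--         elif ch.isalpha() or ch == "_":
--             flush(False)
--             word = [ch]
--         else:
--             flush(ch == "(")
--             out.append(ch)
--     flush(False)
--     if sep:
--         out.append(f'<span class="c">{sep}{comment}</span>')
--     return "".join(out)
-- ===== Notes on version B (the rewrite author's own statement) =====
-- stated objective: faster
-- what changed: Replaced the index-based scanner with nested word/lookahead loops and in-loop comment detection by a single left-to-right state machine over the characters (pending word + pending space count, flushed when the following significant character is known), with the comment tail split off up front via str.partition.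
import Mathlib
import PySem

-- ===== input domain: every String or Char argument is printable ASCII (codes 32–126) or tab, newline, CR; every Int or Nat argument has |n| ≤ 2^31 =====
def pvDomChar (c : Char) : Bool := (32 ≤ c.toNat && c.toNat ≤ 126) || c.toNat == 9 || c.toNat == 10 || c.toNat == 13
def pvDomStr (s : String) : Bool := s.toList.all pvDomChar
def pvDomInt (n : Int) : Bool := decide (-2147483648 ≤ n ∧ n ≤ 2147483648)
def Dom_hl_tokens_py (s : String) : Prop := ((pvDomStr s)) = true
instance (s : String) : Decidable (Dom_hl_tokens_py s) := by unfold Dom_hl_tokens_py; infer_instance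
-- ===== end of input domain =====

-- B replaces A's index scanner (nested word/lookahead loops, in-loop comment check) by a
-- single left-to-right state machine after splitting the comment tail off with str.partition.

-- shared module constants (_TYPES / _KEYWORDS / _BUILTINS) and the span formatting both Pythons share
def pvTypes : List (List Char) :=
  (["float", "float2", "float3", "float4",
    "half",  "half2",  "half3",  "half4",
    "int",   "int2",   "int3",   "int4",
    "uint",  "uint2",  "uint3",  "uint4",
    "bool",  "bool2",  "bool3",  "bool4",
    "void",  "double", "min16float", "min16float3", "min16float4",
    "int3",  "uint3",  "int32",
    "vec2",  "vec3",   "vec4"] : List String).map String.toList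

def pvKeywords : List (List Char) :=
  (["struct", "return", "inout", "in", "out", "static", "const",
    "if", "else", "for", "while", "break", "continue", "do", "switch", "case",
    "groupshared", "cbuffer",
    "Buffer", "RWBuffer", "Texture2D", "RWTexture2D", "Texture2DArray",
    "SamplerState", "StructuredBuffer", "RWStructuredBuffer", "ByteAddressBuffer",
    "SV_DispatchThreadID", "SV_GroupThreadID", "SV_GroupID",
    "FStatelessParticle", "FStatelessParticleContext"] : List String).map String.toList

def pvBuiltins : List (List Char) :=
  (["lerp", "saturate", "normalize", "dot", "cross", "length", "distance",
    "reflect", "refract", "pow", "abs", "sign", "sqrt", "rsqrt",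
    "frac", "floor", "ceil", "round", "clamp", "min", "max",
    "sin", "cos", "tan", "asin", "acos", "atan2", "atan",
    "exp", "log", "log2", "exp2", "fmod",
    "smoothstep", "step", "ddx", "ddy", "mul", "transpose", "determinant",
    "Texture2DSample", "Texture2DSampleLevel", "Load", "SampleLevel",
    "GroupMemoryBarrierWithGroupSync", "AllMemoryBarrierWithGroupSync",
    "InterlockedAdd", "InterlockedMin", "InterlockedMax",
    "ExternalTexture", "TextureSample",
    "QuatMultiply", "ReadFloat3FromBuffer", "ReadFloat4FromBuffer",
    "hash21", "glsl_mod", "SmoothMin", "PointDist", "SegmentDist",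
    "MainCS", "MyModule_Initialize",
    "DECLARE_TILE_CACHE_FLOAT", "LOAD_TILE_SCROLLED"] : List String).map String.toList

-- ch.isalnum() or ch == "_" / ch.isalpha() or ch == "_"
def pvIsWord (c : Char) : Bool := PySem.Chars.isalnum c || c == '_'
def pvIsWordStart (c : Char) : Bool := PySem.Chars.isalpha c || c == '_'

-- the f-string span pieces
def pvSpanKw (w : List Char) : List Char := "<span class=\"kw\">".toList ++ w ++ "</span>".toList
def pvSpanFn (w : List Char) : List Char := "<span class=\"fn\">".toList ++ w ++ "</span>".toList
def pvSpanC (r : List Char) : List Char := "<span class=\"c\">".toList ++ r ++ "</span>".toList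

-- the classification chain (word in _TYPES/_KEYWORDS → kw; word in _BUILTINS or is_call → fn; else raw)
def pvClassify (w : List Char) (isCall : Bool) : List Char :=
  if pvTypes.contains w || pvKeywords.contains w then pvSpanKw w
  else if pvBuiltins.contains w || isCall then pvSpanFn w
  else w

-- ===== PORT A =====
-- the inner j-loop: (consumed word prefix, rest)
def pvScanWord : List Char → List Char × List Char
  | [] => ([], [])
  | c :: cs =>
    if pvIsWord c then
      let p := pvScanWord cs
      (c :: p.1, p.2)
    else ([], c :: cs)

-- the inner k-loop (space skipping for the '(' lookahead)
def pvSkipSpaces : List Char → List Char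
  | [] => []
  | c :: cs => if c == ' ' then pvSkipSpaces cs else c :: cs

def pvIsCallB (r : List Char) : Bool := (pvSkipSpaces r).head? == some '('

theorem pvScanWord_snd_len_le (l : List Char) : (pvScanWord l).2.length ≤ l.length := by
  induction l with
  | nil => simp [pvScanWord]
  | cons c cs ih =>
    simp only [pvScanWord]
    by_cases h : pvIsWord c = true <;> simp [h] <;> omega

-- main while loop of A, as structural recursion on the remaining characters
def pvAgo : List Char → List (List Char)
  | [] => []
  | c :: cs =>
    if c = '/' ∧ cs.head? = some '/' then
      [pvSpanC (c :: cs)]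
    else if h : pvIsWordStart c = true then
      pvClassify (pvScanWord (c :: cs)).1 (pvIsCallB (pvScanWord (c :: cs)).2) ::
        pvAgo (pvScanWord (c :: cs)).2
    else
      [c] :: pvAgo cs
termination_by l => l.length
decreasing_by
  · have h1 : pvIsWord c = true := by
      unfold pvIsWord
      unfold pvIsWordStart at h
      simp only [PySem.Chars.isalpha, PySem.Chars.isalnum, Bool.or_eq_true] at *
      tauto
    simp only [pvScanWord, h1, if_pos]
    have := pvScanWord_snd_len_le cs
    simpa using Nat.lt_succ_of_le this
  · simp

-- "".join(out) ported as flatten + String.ofList (exact: concatenation of the pieces)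
def hl_tokens_py (s : String) : String := String.ofList (pvAgo s.toList).flatten

-- ===== PORT B =====
-- hand port of s.partition("//") (exact: split at the LEFTMOST occurrence;
-- second component = sep + after, none when "//" does not occur)
def pvCutComment : List Char → List Char × Option (List Char)
  | [] => ([], none)
  | c :: cs =>
    if c = '/' ∧ cs.head? = some '/' then ([], some (c :: cs))
    else
      let p := pvCutComment cs
      (c :: p.1, p.2)

-- machine state: (out pieces, pending word, pending space count)
def PvSt : Type := List (List Char) × Option (List Char) × Nat

-- flush(next_is_paren)
def pvFlush (st : PvSt) (nextParen : Bool) : PvSt :=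
  match st with
  | (out, some w, sp) => (out ++ [pvClassify w nextParen, List.replicate sp ' '], none, 0)
  | (out, none, sp) => (out ++ [List.replicate sp ' '], none, 0)

-- the branch chain after the fall-through point of the loop body
def pvRest (st : PvSt) (c : Char) : PvSt :=
  match st with
  | (out, w?, sp) =>
    if c == ' ' then
      match w? with
      | some w => (out, some w, sp + 1)
      | none => (out ++ [[c]], none, sp)
    else if pvIsWordStart c then
      match pvFlush (out, w?, sp) false with
      | (out', _, _) => (out', some [c], 0)
    else
      match pvFlush (out, w?, sp) (c == '(') with
      | (out', _, _) => (out' ++ [[c]], none, 0)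

-- one iteration of `for ch in code`
def pvStep (st : PvSt) (c : Char) : PvSt :=
  match st with
  | (out, some w, sp) =>
    if pvIsWord c then
      if sp = 0 then (out, some (w ++ [c]), 0)
      else pvRest (pvFlush (out, some w, sp) false) c
    else pvRest (out, some w, sp) c
  | (out, none, sp) => pvRest (out, none, sp) c

def hl_tokens_py_alt (s : String) : String :=
  let cut := pvCutComment s.toList
  let st := cut.1.foldl pvStep (([], none, 0) : PvSt)
  let st2 := pvFlush st false
  let out := match cut.2 with
    | some r => st2.1 ++ [pvSpanC r]
    | none => st2.1
  String.ofList out.flatten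

-- ===== PRECONDITION & SPEC =====
def Spec_hl_tokens_py (s : String) (out : String) : Prop := out = hl_tokens_py_alt s
instance (s : String) (out : String) : Decidable (Spec_hl_tokens_py s out) := by unfold Spec_hl_tokens_py; infer_instance

-- ===== CLAIM (what is proved, stated in full; the proofs are below) =====
def Claim_equal_hl_tokens_py : Prop := ∀ (s : String), Dom_hl_tokens_py s → Spec_hl_tokens_py s (hl_tokens_py s)

-- ===== LEMMAS AND PROOFS =====

theorem pvWordStart_isWord {c : Char} (h : pvIsWordStart c = true) : pvIsWord c = true := by
  unfold pvIsWord
  unfold pvIsWordStart at h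
  simp only [PySem.Chars.isalpha, PySem.Chars.isalnum, Bool.or_eq_true] at *
  tauto

theorem pvFlush_none (out : List (List Char)) (sp : Nat) (b : Bool) :
    pvFlush (out, none, sp) b = (out ++ [List.replicate sp ' '], none, 0) := rfl

theorem pvFlush_some (out : List (List Char)) (w : List Char) (sp : Nat) (b : Bool) :
    pvFlush (out, some w, sp) b = (out ++ [pvClassify w b, List.replicate sp ' '], none, 0) := rfl

-- no "//" occurs in the list
def pvNoDS : List Char → Bool
  | c1 :: c2 :: t => !(c1 == '/' && c2 == '/') && pvNoDS (c2 :: t)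
  | _ => true

theorem pvScanWord_eq (l : List Char) :
    (pvScanWord l).1 ++ (pvScanWord l).2 = l := by
  induction l with
  | nil => simp [pvScanWord]
  | cons c cs ih =>
    simp only [pvScanWord]
    by_cases h : pvIsWord c = true <;> simp [h, ih]

theorem pvScanWord_fst_word (l : List Char) :
    ∀ x ∈ (pvScanWord l).1, pvIsWord x = true := by
  induction l with
  | nil => simp [pvScanWord]
  | cons c cs ih =>
    intro x hx
    simp only [pvScanWord] at hx
    by_cases h : pvIsWord c = true
    · simp only [h, if_pos, List.mem_cons] at hx
      rcases hx with rfl | hx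
      · exact h
      · exact ih x hx
    · simp [h] at hx

theorem pvScanWord_snd_head (l : List Char) :
    ∀ h, (pvScanWord l).2.head? = some h → pvIsWord h = false := by
  induction l with
  | nil => simp [pvScanWord]
  | cons c cs ih =>
    intro x hx
    simp only [pvScanWord] at hx
    by_cases h : pvIsWord c = true
    · simp only [h, if_pos] at hx
      exact ih x hx
    · simp only [h] at hx
      simp at hx
      rcases hx with ⟨rfl, -⟩
      simpa using h

theorem pvScanWord_append (w rest : List Char)
    (hw : ∀ x ∈ w, pvIsWord x = true)
    (hr : ∀ h, rest.head? = some h → pvIsWord h = false) :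
    pvScanWord (w ++ rest) = (w, rest) := by
  induction w with
  | nil =>
    cases rest with
    | nil => simp [pvScanWord]
    | cons r t =>
      have := hr r (by simp)
      simp [pvScanWord, this]
  | cons a w' ih =>
    have ha : pvIsWord a = true := hw a (by simp)
    simp only [List.cons_append, pvScanWord, ha, if_pos]
    rw [ih (fun x hx => hw x (by simp [hx]))]

-- flattened A output
def pvJA (l : List Char) : List Char := (pvAgo l).flatten

-- the three shapes of pvAgo, as rewrite lemmas
theorem pvAgo_comment (c : Char) (cs : List Char) (h : c = '/' ∧ cs.head? = some '/') :
    pvAgo (c :: cs) = [pvSpanC (c :: cs)] := by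
  rw [pvAgo]; simp [h]

theorem pvAgo_word (c : Char) (cs : List Char)
    (hnc : ¬ (c = '/' ∧ cs.head? = some '/')) (hw : pvIsWordStart c = true) :
    pvAgo (c :: cs) =
      pvClassify (pvScanWord (c :: cs)).1 (pvIsCallB (pvScanWord (c :: cs)).2) ::
        pvAgo (pvScanWord (c :: cs)).2 := by
  rw [pvAgo]; simp [hnc, hw]

theorem pvAgo_other (c : Char) (cs : List Char)
    (hnc : ¬ (c = '/' ∧ cs.head? = some '/')) (hw : ¬ pvIsWordStart c = true) :
    pvAgo (c :: cs) = [c] :: pvAgo cs := by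
  rw [pvAgo]; simp [hnc, hw]

-- B-side word-run lemma: already-pending word absorbs a run of word characters
theorem pvFold_wordRun (w : List Char) (hw : ∀ x ∈ w, pvIsWord x = true) :
    ∀ (out : List (List Char)) (w0 : List Char),
      w.foldl pvStep ((out, some w0, 0) : PvSt) = (out, some (w0 ++ w), 0) := by
  induction w with
  | nil => intro out w0; simp
  | cons a w' ih =>
    intro out w0
    have ha : pvIsWord a = true := hw a (by simp)
    simp only [List.foldl_cons, pvStep, ha, if_pos, if_true]
    rw [ih (fun x hx => hw x (by simp [hx])) out (w0 ++ [a])]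
    simp

-- the statements of the two mutual invariants
def pvBN (r : List Char) : Prop :=
  ∀ out : List (List Char), pvNoDS r = true →
    (pvFlush (r.foldl pvStep ((out, none, 0) : PvSt)) false).1.flatten =
      out.flatten ++ pvJA r

def pvBG (r : List Char) : Prop :=
  ∀ (out : List (List Char)) (w : List Char) (sp : Nat), pvNoDS r = true →
    (sp = 0 → ∀ h, r.head? = some h → pvIsWord h = false) →
    (pvFlush (r.foldl pvStep ((out, some w, sp) : PvSt)) false).1.flatten =
      out.flatten ++ pvClassify w (pvIsCallB r) ++ List.replicate sp ' ' ++ pvJA r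

theorem pvNoDS_tail {c : Char} {cs : List Char} (h : pvNoDS (c :: cs) = true) :
    pvNoDS cs = true := by
  cases cs with
  | nil => simp [pvNoDS]
  | cons d t =>
    simp only [pvNoDS, Bool.and_eq_true] at h
    exact h.2

theorem pvNoDS_not_comment {c : Char} {cs : List Char} (h : pvNoDS (c :: cs) = true) :
    ¬ (c = '/' ∧ cs.head? = some '/') := by
  rintro ⟨rfl, hh⟩
  cases cs with
  | nil => simp at hh
  | cons d t =>
    simp only [List.head?_cons, Option.some.injEq] at hh
    subst hh
    simp [pvNoDS] at h

theorem pvNoDS_append_left {w r : List Char} (h : pvNoDS (w ++ r) = true) :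
    pvNoDS r = true := by
  induction w with
  | nil => simpa using h
  | cons a w' ih => exact ih (pvNoDS_tail (by simpa using h))

-- the combined strong induction
theorem pvBNG : ∀ n : Nat, ∀ r : List Char, r.length ≤ n → pvBN r ∧ pvBG r := by
  intro n
  induction n with
  | zero =>
    intro r hr
    have : r = [] := by
      cases r with
      | nil => rfl
      | cons c cs => simp at hr
    subst this
    constructor
    · intro out _
      simp [pvFlush, pvJA, pvAgo]
    · intro out w sp _ _
      simp [pvFlush, pvJA, pvAgo, pvIsCallB, pvSkipSpaces, pvClassify]
  | succ n ih =>
    intro r hr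
    cases r with
    | nil =>
      constructor
      · intro out _
        simp [pvFlush, pvJA, pvAgo]
      · intro out w sp _ _
        simp [pvFlush, pvJA, pvAgo, pvIsCallB, pvSkipSpaces, pvClassify]
    | cons c cs =>
      have hcs : cs.length ≤ n := by simpa using hr
      have hBN : pvBN (c :: cs) := by
        intro out hds
        have hnc := pvNoDS_not_comment hds
        by_cases hw : pvIsWordStart c = true
        · -- a word starts here: split off the maximal word run
          have hcw : pvIsWord c = true := pvWordStart_isWord hw
          have hwt : (pvScanWord (c :: cs)).1 = c :: (pvScanWord cs).1 := by
            simp [pvScanWord, hcw]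
          have hrt : (pvScanWord (c :: cs)).2 = (pvScanWord cs).2 := by
            simp [pvScanWord, hcw]
          obtain ⟨w, rest, hscan⟩ : ∃ w rest, pvScanWord (c :: cs) = (w, rest) := ⟨_, _, rfl⟩
          rw [hscan] at hwt hrt
          simp only at hwt hrt
          have hsplit : w ++ rest = c :: cs := by
            have := pvScanWord_eq (c :: cs); rw [hscan] at this; exact this
          have hrlen : rest.length ≤ n := by
            have : rest.length ≤ cs.length := hrt ▸ pvScanWord_snd_len_le cs
            omega
          have hallw : ∀ x ∈ w, pvIsWord x = true := by
            have := pvScanWord_fst_word (c :: cs); rw [hscan] at this; exact this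
          have hresth : ∀ h, rest.head? = some h → pvIsWord h = false := by
            have := pvScanWord_snd_head (c :: cs); rw [hscan] at this; exact this
          have hdsr : pvNoDS rest = true := by
            apply pvNoDS_append_left (w := w)
            rw [hsplit]; exact hds
          -- fold over c :: cs = fold over w then over rest
          have hfold : (c :: cs).foldl pvStep ((out, none, 0) : PvSt) =
              rest.foldl pvStep (w.foldl pvStep ((out, none, 0) : PvSt)) := by
            rw [← hsplit]; exact List.foldl_append ..
          -- fold over w from fresh state
          have hfw : w.foldl pvStep ((out, none, 0) : PvSt) = (out ++ [[]], some w, 0) := by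
            rw [hwt]
            simp only [List.foldl_cons, pvStep, pvRest]
            have hcsp : (c == ' ') = false := by
              by_contra hc
              simp at hc
              subst hc
              exact absurd hcw (by decide)
            simp only [hcsp, Bool.false_eq_true, if_false, hw, if_true, pvFlush_none]
            rw [pvFold_wordRun (pvScanWord cs).1
              (fun x hx => hallw x (by rw [hwt]; simp [hx])) (out ++ [List.replicate 0 ' ']) [c]]
            simp [hwt]
          rw [hfold, hfw]
          have hBGrest := (ih rest hrlen).2
          rw [hBGrest (out ++ [[]]) w 0 hdsr (fun _ => hresth)]
          simp only [pvJA]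
          rw [pvAgo_word c cs hnc hw, hscan]
          simp
        · -- not a word start: single character (c :: cs is "//"-free, so no comment here)
          have hcw' : pvIsWord c = true ∨ pvIsWord c = false := by
            cases h : pvIsWord c <;> simp
          simp only [List.foldl_cons]
          have hstep : pvStep ((out, none, 0) : PvSt) c = pvRest ((out, none, 0) : PvSt) c := by
            simp [pvStep]
          rw [hstep]
          by_cases hsp : (c == ' ') = true
          · have hc : c = ' ' := by simpa using hsp
            simp only [pvRest, hsp, if_pos]
            have hBNcs := (ih cs hcs).1
            rw [hBNcs (out ++ [[c]]) (pvNoDS_tail hds)]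
            simp only [pvJA]
            rw [pvAgo_other c cs hnc hw]
            simp
          · simp only [pvRest, hsp, Bool.false_eq_true, if_false, hw, if_false, pvFlush_none]
            have hBNcs := (ih cs hcs).1
            rw [hBNcs (out ++ [List.replicate 0 ' '] ++ [[c]]) (pvNoDS_tail hds)]
            simp only [pvJA]
            rw [pvAgo_other c cs hnc hw]
            simp
      have hBG : pvBG (c :: cs) := by
        intro out w sp hds hhead
        have hnc := pvNoDS_not_comment hds
        by_cases hcw : pvIsWord c = true
        · -- word character after a pending word: sp ≠ 0, flush then behave as the fresh machine
          have hsp : sp ≠ 0 := by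
            intro h0
            have := hhead h0 c (by simp)
            rw [hcw] at this
            exact Bool.true_eq_false.mp this
          simp only [List.foldl_cons, pvStep, hcw, if_pos, if_true, hsp, if_false, pvFlush_some]
          -- pvRest on the flushed (word-free) state coincides with pvStep on it
          have hre : pvRest ((out ++ [pvClassify w false, List.replicate sp ' '], none, 0) : PvSt) c =
              pvStep ((out ++ [pvClassify w false, List.replicate sp ' '], none, 0) : PvSt) c := by
            simp [pvStep]
          rw [hre, ← List.foldl_cons]
          rw [hBN (out ++ [pvClassify w false, List.replicate sp ' ']) hds]
          have hcall : pvIsCallB (c :: cs) = false := by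
            have hcsp : (c == ' ') = false := by
              by_contra hc
              simp at hc
              subst hc
              exact absurd hcw (by decide)
            have hcpar : (c == '(') = false := by
              by_contra hc
              simp at hc
              subst hc
              exact absurd hcw (by decide)
            simp [pvIsCallB, pvSkipSpaces, hcsp]
            intro h
            subst h
            simp at hcpar
          rw [hcall]
          simp
        · by_cases hsp : (c == ' ') = true
          · -- a space: it joins the pending run
            have hc : c = ' ' := by simpa using hsp
            subst hc
            simp only [List.foldl_cons, pvStep, hcw, Bool.false_eq_true, if_false, pvRest, hsp,
              if_pos]
            have hBGcs := (ih cs hcs).2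
            rw [hBGcs out w (sp + 1) (pvNoDS_tail hds) (by omega)]
            have hcall : pvIsCallB (' ' :: cs) = pvIsCallB cs := by
              simp [pvIsCallB, pvSkipSpaces]
            simp only [pvJA]
            rw [pvAgo_other ' ' cs hnc (by decide)]
            simp [hcall, List.replicate_succ' (n := sp)]
          · -- any other character: flush with the '(' test, emit it, continue fresh
            have hwst : ¬ pvIsWordStart c = true := fun h => by
              rw [pvWordStart_isWord h] at hcw; exact hcw rfl
            simp only [List.foldl_cons, pvStep, hcw, Bool.false_eq_true, if_false, pvRest, hsp,
              hwst, pvFlush_some, pvFlush_none]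
            have hBNcs := (ih cs hcs).1
            rw [hBNcs (out ++ [pvClassify w (c == '('), List.replicate sp ' '] ++ [[c]])
              (pvNoDS_tail hds)]
            have hcall : pvIsCallB (c :: cs) = (c == '(') := by
              simp [pvIsCallB, pvSkipSpaces, hsp]
            rw [hcall]
            simp only [pvJA]
            rw [pvAgo_other c cs hnc hwst]
            simp
      exact ⟨hBN, hBG⟩

-- pvCutComment facts
theorem pvCut_fst_noDS (l : List Char) : pvNoDS (pvCutComment l).1 = true := by
  induction l with
  | nil => simp [pvCutComment, pvNoDS]
  | cons c cs ih =>
    simp only [pvCutComment]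
    by_cases h : c = '/' ∧ cs.head? = some '/'
    · simp [h, pvNoDS]
    · simp only [h, if_false]
      cases hcc : (pvCutComment cs).1 with
      | nil => simp [pvNoDS]
      | cons d t =>
        have hd : cs.head? = some d := by
          cases cs with
          | nil => simp [pvCutComment] at hcc
          | cons e u =>
            simp only [pvCutComment] at hcc
            by_cases he : e = '/' ∧ u.head? = some '/'
            · simp [he] at hcc
            · simp only [he, if_false] at hcc
              cases hcc
              simp
        have hne : ¬ (c = '/' ∧ d = '/') := by
          rintro ⟨rfl, rfl⟩
          exact h ⟨rfl, hd⟩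
        simp only [pvNoDS, Bool.and_eq_true, Bool.not_eq_eq_eq_not, Bool.not_true]
        constructor
        · by_cases h1 : c = '/' <;> by_cases h2 : d = '/' <;> simp [h1, h2] <;> exact hne ⟨h1, h2⟩
        · rw [← hcc]; exact ih

theorem pvCut_fst_head (l : List Char) :
    (pvCutComment l).1.head? = l.head? ∨ (pvCutComment l).1 = [] := by
  cases l with
  | nil => right; simp [pvCutComment]
  | cons c cs =>
    simp only [pvCutComment]
    by_cases h : c = '/' ∧ cs.head? = some '/'
    · right; simp [h]
    · left; simp [h]

theorem pvCut_append_word (w r : List Char) (hw : ∀ x ∈ w, pvIsWord x = true) :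
    pvCutComment (w ++ r) = (w ++ (pvCutComment r).1, (pvCutComment r).2) := by
  induction w with
  | nil => simp
  | cons a w' ih =>
    have ha : pvIsWord a = true := hw a (by simp)
    have hna : ¬ a = '/' := by
      rintro rfl
      exact absurd ha (by decide)
    simp only [List.cons_append, pvCutComment]
    have : ¬ (a = '/' ∧ (w' ++ r).head? = some '/') := fun h => hna h.1
    simp only [this, if_false]
    rw [ih (fun x hx => hw x (by simp [hx]))]

-- the '(' lookahead sees the same character on the code part as on the full line
theorem pvCut_isCall (r : List Char) : pvIsCallB (pvCutComment r).1 = pvIsCallB r := by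
  induction r with
  | nil => simp [pvCutComment]
  | cons c cs ih =>
    simp only [pvCutComment]
    by_cases h : c = '/' ∧ cs.head? = some '/'
    · obtain ⟨rfl, _⟩ := h
      simp only [if_pos, true_and]
      split
      · simp [pvIsCallB, pvSkipSpaces]
      · simp_all
    · simp only [h, if_false]
      by_cases hsp : (c == ' ') = true
      · have hc : c = ' ' := by simpa using hsp
        simp only [pvIsCallB, pvSkipSpaces, hsp, if_pos]
        exact ih
      · simp [pvIsCallB, pvSkipSpaces, hsp]

-- A's output splits at the comment exactly as pvCutComment does
theorem pvJA_cut : ∀ n : Nat, ∀ l : List Char, l.length ≤ n →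
    pvJA l = pvJA (pvCutComment l).1 ++
      (match (pvCutComment l).2 with
       | some r => pvSpanC r
       | none => ([] : List Char)) := by
  intro n
  induction n with
  | zero =>
    intro l hl
    have : l = [] := by
      cases l with
      | nil => rfl
      | cons c cs => simp at hl
    subst this
    simp [pvCutComment]
  | succ n ih =>
    intro l hl
    cases l with
    | nil => simp [pvCutComment]
    | cons c cs =>
      have hcs : cs.length ≤ n := by simpa using hl
      by_cases hcmt : c = '/' ∧ cs.head? = some '/'
      · obtain ⟨rfl, h2⟩ := hcmt
        simp only [pvCutComment, h2, and_self, if_pos, true_and]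
        simp only [pvJA]
        rw [pvAgo_comment '/' cs ⟨rfl, h2⟩]
        simp [pvAgo]
      · by_cases hw : pvIsWordStart c = true
        · have hcw : pvIsWord c = true := pvWordStart_isWord hw
          have hwt0 : (pvScanWord (c :: cs)).1 = c :: (pvScanWord cs).1 := by
            simp [pvScanWord, hcw]
          have hrt0 : (pvScanWord (c :: cs)).2 = (pvScanWord cs).2 := by
            simp [pvScanWord, hcw]
          obtain ⟨w, rest, hscan⟩ : ∃ w rest, pvScanWord (c :: cs) = (w, rest) := ⟨_, _, rfl⟩
          rw [hscan] at hwt0 hrt0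
          simp only at hwt0 hrt0
          have hsplit : w ++ rest = c :: cs := by
            have := pvScanWord_eq (c :: cs); rw [hscan] at this; exact this
          have hrlen : rest.length ≤ n := by
            have : rest.length ≤ cs.length := hrt0 ▸ pvScanWord_snd_len_le cs
            omega
          have hallw : ∀ x ∈ w, pvIsWord x = true := by
            have := pvScanWord_fst_word (c :: cs); rw [hscan] at this; exact this
          have hresth : ∀ h, rest.head? = some h → pvIsWord h = false := by
            have := pvScanWord_snd_head (c :: cs); rw [hscan] at this; exact this
          -- cut splits after the word
          have hcut : pvCutComment (c :: cs) =
              (w ++ (pvCutComment rest).1, (pvCutComment rest).2) := by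
            rw [show (c :: cs) = w ++ rest from hsplit.symm, pvCut_append_word w rest hallw]
          rw [hcut]
          -- head of the cut code part is still not a word char
          have hresth' : ∀ h, (pvCutComment rest).1.head? = some h → pvIsWord h = false := by
            intro h hh
            rcases pvCut_fst_head rest with he | he
            · exact hresth h (he ▸ hh)
            · rw [he] at hh; simp at hh
          -- pvAgo on the cut code part also starts with this word
          have hcode : pvJA (w ++ (pvCutComment rest).1) =
              pvClassify w (pvIsCallB (pvCutComment rest).1) ++ pvJA (pvCutComment rest).1 := by
            have hwne : w ++ (pvCutComment rest).1 = c :: ((pvScanWord cs).1 ++ (pvCutComment rest).1) := by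
              rw [hwt0]; simp
            have hscan2 : pvScanWord (w ++ (pvCutComment rest).1) = (w, (pvCutComment rest).1) :=
              pvScanWord_append w (pvCutComment rest).1 hallw hresth'
            have hnc2 : ¬ (c = '/' ∧ ((pvScanWord cs).1 ++ (pvCutComment rest).1).head? = some '/') := by
              rintro ⟨rfl, _⟩
              exact absurd hcw (by decide)
            simp only [pvJA]
            rw [hwne, pvAgo_word c _ hnc2 hw, ← hwne, hscan2]
            simp [pvJA]
          rw [hcode, pvCut_isCall rest]
          simp only [pvJA]
          rw [pvAgo_word c cs hcmt hw, hscan]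
          simp only [List.flatten_cons]
          rw [show (pvAgo rest).flatten = pvJA rest from rfl, ih rest hrlen]
          simp [pvJA]
        · -- single character
          have hcc : pvCutComment (c :: cs) = (c :: (pvCutComment cs).1, (pvCutComment cs).2) := by
            simp [pvCutComment, hcmt]
          rw [hcc]
          have hnc2 : ¬ (c = '/' ∧ (pvCutComment cs).1.head? = some '/') := by
            rintro ⟨rfl, hh⟩
            rcases pvCut_fst_head cs with he | he
            · exact hcmt ⟨rfl, he ▸ hh⟩
            · rw [he] at hh; simp at hh
          simp only [pvJA]
          rw [pvAgo_other c cs hcmt hw, pvAgo_other c _ hnc2 hw]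
          simp only [List.flatten_cons]
          rw [show (pvAgo cs).flatten = pvJA cs from rfl,
            show (pvAgo (pvCutComment cs).1).flatten = pvJA (pvCutComment cs).1 from rfl,
            ih cs hcs]
          simp [pvJA]

-- ===== VERDICT (by name: the statement is the Claim_ definition above) =====
theorem hl_tokens_py_spec : Claim_equal_hl_tokens_py := by
  intro s _
  unfold Spec_hl_tokens_py hl_tokens_py hl_tokens_py_alt
  apply congrArg String.ofList
  set l := s.toList
  have hBN := (pvBNG (pvCutComment l).1.length (pvCutComment l).1 le_rfl).1
  have hflush := hBN [] (pvCut_fst_noDS l)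
  have hcut := pvJA_cut l.length l le_rfl
  cases hc : (pvCutComment l).2 with
  | none =>
    simp only [hc]
    rw [hflush]
    rw [show (pvAgo l).flatten = pvJA l from rfl, hcut, hc]
    simp [pvJA]
  | some r =>
    simp only [hc, List.flatten_append]
    rw [hflush]
    rw [show (pvAgo l).flatten = pvJA l from rfl, hcut, hc]
    simp [pvJA]
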